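-- pv_equiv track=rewrite | github.com/haroExplorium/explorium-cli | explorium_cli/research.py | _find_domain_column
-- ===== SOURCE A (Python) =====
-- def _find_domain_column(fieldnames: list[str]) -> str | None:
--     """Find the column most likely to contain company domains."""
--     aliases = [
--         "domain", "website", "url", "company_domain",
--         "company_website", "site",
--     ]
--     lower_map = {f.strip().lower(): f for f in fieldnames}
--     for alias in aliases:
--         if alias in lower_map:
--             return lower_map[alias]
--     return None
-- ===== SOURCE B (Python) =====
-- def _find_domain_column(fieldnames: list[str]) -> str | None:
--     """Find the column most likely to contain company domains."""
--     aliases = [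
--         "domain", "website", "url", "company_domain",
--         "company_website", "site",
--     ]
--     best = None
--     best_rank = len(aliases)
--     for f in fieldnames:
--         key = f.strip().lower()
--         if key in aliases and aliases.index(key) < best_rank:
--             best = f
--             best_rank = aliases.index(key)
--     return best
-- ===== Notes on version B (the rewrite author's own statement) =====
-- stated objective: alternative
-- what changed: B makes a single pass over fieldnames keeping the best (lowest-priority-rank) alias match instead of building a normalized->original dict and probing it alias by alias; Pre_ excludes lists where the winning alias is matched by several fieldnames whose first and last occurrences differ, since A's dict-overwrite then returns an accidental last occurrence.
-- outside the precondition, e.g. on _find_domain_column(['Domain', 'domain ']): A returns 'domain ', B returns 'Domain'; on _find_domain_column(['site', 'SITE']): A returns 'SITE', B returns 'site'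
import Mathlib
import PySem

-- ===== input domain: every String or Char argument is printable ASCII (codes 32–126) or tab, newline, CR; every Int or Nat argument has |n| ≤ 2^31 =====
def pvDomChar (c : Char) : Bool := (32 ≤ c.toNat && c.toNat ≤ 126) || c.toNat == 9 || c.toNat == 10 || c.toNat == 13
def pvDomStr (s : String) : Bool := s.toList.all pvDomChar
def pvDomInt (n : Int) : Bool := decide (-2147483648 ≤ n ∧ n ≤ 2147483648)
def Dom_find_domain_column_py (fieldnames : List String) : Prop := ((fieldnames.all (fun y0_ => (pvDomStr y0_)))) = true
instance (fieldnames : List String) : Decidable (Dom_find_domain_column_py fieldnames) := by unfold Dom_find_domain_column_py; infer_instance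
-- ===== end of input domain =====

-- B replaces A's build-a-dict-then-probe-six-aliases scheme by a single pass over the
-- fieldnames keeping the match of lowest alias rank (alternative decomposition).
-- Pre_ excludes lists where several fieldnames normalize to the winning alias with
-- differing first/last occurrence (A's dict-overwrite keeps an accidental last one).

-- ===== PORT A =====
def pvAliases : List String :=
  ["domain", "website", "url", "company_domain", "company_website", "site"]

-- f.strip().lower()
def pvNorm (f : String) : String := PySem.Str.lower (PySem.Str.strip f)

-- 'for alias in aliases: if alias in lower_map: return lower_map[alias]'
def pvALoop (m : PySem.Dict String String) : List String → Option String
  | [] => none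
  | a :: rest =>
    match m.get? a with
    | some v => some v
    | none => pvALoop m rest

def find_domain_column_py (fieldnames : List String) : Option String :=
  let lower_map := fieldnames.foldl (fun d f => d.insert (pvNorm f) f) PySem.Dict.empty
  pvALoop lower_map pvAliases

-- ===== PORT B =====
-- loop body: 'key = f.strip().lower(); if key in aliases and aliases.index(key) < best_rank: ...'
def pvBStep (st : Option String × Nat) (f : String) : Option String × Nat :=
  let key := pvNorm f
  if key ∈ pvAliases ∧ pvAliases.idxOf key < st.2 then
    (some f, pvAliases.idxOf key)
  else st

def find_domain_column_py_alt (fieldnames : List String) : Option String :=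
  (fieldnames.foldl pvBStep (none, pvAliases.length)).1

-- ===== PRECONDITION & SPEC =====
-- the first alias (in priority order) matched by any fieldname, if any
def pvWin (fieldnames : List String) : Option String :=
  pvAliases.find? (fun a => fieldnames.any (fun f => pvNorm f == a))

-- Pre_ excludes lists in which the first and last fieldnames normalizing to the
-- highest-priority matched alias differ: there A's dict-overwrite returns the
-- accidental last occurrence while B returns the first; both are defensible.
def Pre_find_domain_column_py (fieldnames : List String) : Prop :=
  (match pvWin fieldnames with
   | none => true
   | some a => ((fieldnames.filter (fun f => pvNorm f == a)).head?
                 == (fieldnames.filter (fun f => pvNorm f == a)).getLast?)) = true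
instance (fieldnames : List String) : Decidable (Pre_find_domain_column_py fieldnames) := by
  unfold Pre_find_domain_column_py; infer_instance

def pvWitness_find_domain_column_py : List String := ["id", "Domain", "name"]

def Spec_find_domain_column_py (fieldnames : List String) (out : Option String) : Prop := out = find_domain_column_py_alt fieldnames
instance (fieldnames : List String) (out : Option String) : Decidable (Spec_find_domain_column_py fieldnames out) := by unfold Spec_find_domain_column_py; infer_instance

-- ===== CLAIM (what is proved, stated in full; the proofs are below) =====
def Claim_equal_find_domain_column_py : Prop := ∀ (fieldnames : List String), Dom_find_domain_column_py fieldnames → Pre_find_domain_column_py fieldnames → Spec_find_domain_column_py fieldnames (find_domain_column_py fieldnames)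

-- ===== LEMMAS AND PROOFS =====

-- rank of a fieldname: index of its normalized form among the aliases (6 = no match)
def pvRk (f : String) : Nat := pvAliases.idxOf (pvNorm f)

-- running minimum of ranks
def pvM (fs : List String) (r : Nat) : Nat := fs.foldl (fun acc f => min acc (pvRk f)) r

theorem pvRk_le (f : String) : pvRk f ≤ 6 := by
  have := List.idxOf_le_length (a := pvNorm f) (l := pvAliases)
  simpa [pvRk] using this

theorem pvM_le (fs : List String) (r : Nat) : pvM fs r ≤ r := by
  induction fs generalizing r with
  | nil => simp [pvM]
  | cons f rest ih =>
    have h := ih (min r (pvRk f))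
    have : pvM (f :: rest) r = pvM rest (min r (pvRk f)) := rfl
    omega

theorem pvM_le_of_mem {f : String} {fs : List String} (r : Nat) (h : f ∈ fs) :
    pvM fs r ≤ pvRk f := by
  induction fs generalizing r with
  | nil => cases h
  | cons g rest ih =>
    rcases List.mem_cons.mp h with h | h
    · subst h
      have := pvM_le rest (min r (pvRk f))
      have : pvM (f :: rest) r = pvM rest (min r (pvRk f)) := rfl
      omega
    · exact ih (min r (pvRk g)) h

theorem pvM_ge {fs : List String} {i : Nat} (r : Nat) (h : ∀ f ∈ fs, i ≤ pvRk f)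
    (hr : i ≤ r) : i ≤ pvM fs r := by
  induction fs generalizing r with
  | nil => simpa [pvM] using hr
  | cons f rest ih =>
    have h1 : i ≤ pvRk f := h f (List.mem_cons_self ..)
    have : pvM (f :: rest) r = pvM rest (min r (pvRk f)) := rfl
    have := ih (r := min r (pvRk f)) (fun g hg => h g (List.mem_cons_of_mem _ hg)) (by omega)
    omega

-- the guard of B's step, simplified when the current rank is ≤ 6
theorem pvAliases_length : pvAliases.length = 6 := rfl

theorem pvBStep_eq (b : Option String) (r : Nat) (f : String) (hr : r ≤ 6) :
    pvBStep (b, r) f = if pvRk f < r then (some f, pvRk f) else (b, r) := by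
  by_cases h : pvRk f < r
  · have hlt : pvAliases.idxOf (pvNorm f) < pvAliases.length := by
      unfold pvRk at h; rw [pvAliases_length]; omega
    have hmem : pvNorm f ∈ pvAliases := List.idxOf_lt_length_iff.mp hlt
    simp only [pvBStep]
    rw [if_pos ⟨hmem, h⟩, if_pos h]
    rfl
  · simp only [pvBStep]
    rw [if_neg, if_neg h]
    rintro ⟨-, hlt⟩
    exact h hlt

-- characterization of B's fold: first fieldname attaining the minimal rank
theorem pvFold_char (fs : List String) (b : Option String) (r : Nat) (hr : r ≤ 6) :
    fs.foldl pvBStep (b, r)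
      = if pvM fs r < r then (fs.find? (fun f => pvRk f == pvM fs r), pvM fs r) else (b, r) := by
  induction fs generalizing b r with
  | nil => simp [pvM]
  | cons f rest ih =>
    have hcons : pvM (f :: rest) r = pvM rest (min r (pvRk f)) := rfl
    rw [List.foldl_cons, pvBStep_eq b r f hr]
    by_cases h : pvRk f < r
    · rw [if_pos h]
      have hmin : min r (pvRk f) = pvRk f := by omega
      have hM : pvM (f :: rest) r = pvM rest (pvRk f) := by rw [hcons, hmin]
      have hMle : pvM rest (pvRk f) ≤ pvRk f := pvM_le rest (pvRk f)
      rw [ih (some f) (pvRk f) (by have := pvRk_le f; omega)]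
      by_cases h2 : pvM rest (pvRk f) < pvRk f
      · rw [if_pos h2, if_pos (by omega : pvM (f :: rest) r < r)]
        rw [List.find?_cons_of_neg (by simp only [beq_iff_eq]; omega), hM]
      · have heq : pvM rest (pvRk f) = pvRk f := by omega
        rw [if_neg h2, if_pos (by omega : pvM (f :: rest) r < r)]
        rw [hM, heq, List.find?_cons_of_pos (by simp)]
    · rw [if_neg h]
      have hmin : min r (pvRk f) = r := by omega
      have hM : pvM (f :: rest) r = pvM rest r := by rw [hcons, hmin]
      rw [ih b r hr, hM]
      by_cases h2 : pvM rest r < r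
      · rw [if_pos h2, if_pos h2,
           List.find?_cons_of_neg (by simp only [beq_iff_eq]; omega)]
      · rw [if_neg h2, if_neg h2]

theorem pvB_char (fs : List String) :
    find_domain_column_py_alt fs
      = if pvM fs 6 < 6 then fs.find? (fun f => pvRk f == pvM fs 6) else none := by
  have h6 : pvAliases.length = 6 := rfl
  unfold find_domain_column_py_alt
  rw [h6, pvFold_char fs none 6 (le_refl 6)]
  by_cases h : pvM fs 6 < 6 <;> simp [h]

-- the dict built by A answers lookups as a last-match scan
theorem pvDict_get (fs : List String) (d : PySem.Dict String String) (a : String) :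
    (fs.foldl (fun d f => d.insert (pvNorm f) f) d).get? a
      = (fs.reverse.find? (fun f => pvNorm f == a)).or (d.get? a) := by
  induction fs generalizing d with
  | nil => simp
  | cons f rest ih =>
    have hins : (d.insert (pvNorm f) f).get? a
        = (List.find? (fun g => pvNorm g == a) [f]).or (d.get? a) := by
      by_cases h : pvNorm f = a
      · subst h
        rw [PySem.Dict.get?_insert_self]
        simp [List.find?]
      · rw [PySem.Dict.get?_insert_of_ne _ _ (fun hh => h hh.symm)]
        rw [List.find?_cons_of_neg (by simpa using h), List.find?_nil]
        rfl
    rw [List.foldl_cons, ih, hins, List.reverse_cons, List.find?_append, Option.or_assoc]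

theorem pvALoop_char (m : PySem.Dict String String) (l : List String) :
    pvALoop m l = match l.find? (fun a => (m.get? a).isSome) with
                  | none => none
                  | some a => m.get? a := by
  induction l with
  | nil => rfl
  | cons a rest ih =>
    rw [pvALoop]
    cases h : m.get? a with
    | some v => rw [List.find?_cons_of_pos (by simp [h])]; simp [h]
    | none => rw [List.find?_cons_of_neg (by simp [h])]; simpa [h] using ih

theorem pvA_char (fs : List String) :
    find_domain_column_py fs
      = match pvWin fs with
        | none => none
        | some a => fs.reverse.find? (fun f => pvNorm f == a) := by
  unfold find_domain_column_py
  rw [pvALoop_char]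
  have hget : ∀ a, (fs.foldl (fun d f => d.insert (pvNorm f) f) PySem.Dict.empty).get? a
      = fs.reverse.find? (fun f => pvNorm f == a) := by
    intro a; rw [pvDict_get]; simp [PySem.Dict.empty, PySem.Dict.get?]
  have hpred : (fun a => ((fs.foldl (fun d f => d.insert (pvNorm f) f) PySem.Dict.empty).get? a).isSome)
      = (fun a => fs.any (fun f => pvNorm f == a)) := by
    funext a
    rw [hget a, List.isSome_find?, List.any_reverse]
  unfold pvWin
  rw [hpred]
  cases h : pvAliases.find? (fun a => fs.any (fun f => pvNorm f == a)) with
  | none => rfl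
  | some a => simp [hget a]

-- decomposition of a successful find? into an index with all-false prefix
theorem pv_find?_idx {α : Type} (p : α → Bool) (l : List α) (a : α) (h : l.find? p = some a) :
    ∃ i, ∃ hi : i < l.length, l[i] = a ∧ p a = true ∧
      ∀ j, (hj : j < i) → p (l[j]'(by omega)) = false := by
  induction l with
  | nil => simp at h
  | cons x xs ih =>
    by_cases hp : p x
    · rw [List.find?_cons_of_pos hp] at h
      injection h with h
      subst h
      exact ⟨0, by simp, by simp, hp, by omega⟩
    · rw [List.find?_cons_of_neg (by simpa using hp)] at h
      obtain ⟨i, hi, hget, hpa, hpre⟩ := ih h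
      refine ⟨i + 1, by simpa using Nat.succ_lt_succ hi, by simpa using hget, hpa, ?_⟩
      intro j hj
      cases j with
      | zero => simpa using hp
      | succ j => simpa using hpre j (by omega)

theorem pvAliases_nodup : pvAliases.Nodup := by decide

-- when some alias is matched, the minimal rank is the winning alias's index
theorem pvM_of_win (fs : List String) (a : String) (h : pvWin fs = some a) :
    ∃ i, ∃ hi : i < 6, pvAliases[i] = a ∧ pvM fs 6 = i := by
  obtain ⟨i, hi, hget, hpa, hpre⟩ := pv_find?_idx _ _ _ h
  have hi6 : i < 6 := hi
  refine ⟨i, hi6, hget, ?_⟩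
  -- some fieldname has rank i
  obtain ⟨f, hf, hfa⟩ := List.any_eq_true.mp hpa
  have hfa' : pvNorm f = a := by simpa using hfa
  have hrkf : pvRk f = i := by
    unfold pvRk
    rw [hfa', ← hget]
    exact pvAliases_nodup.idxOf_getElem ..
  -- no fieldname has rank < i
  have hge : ∀ g ∈ fs, i ≤ pvRk g := by
    intro g hg
    by_contra hnlt
    have hlt : pvRk g < i := by omega
    have hlen : pvRk g < pvAliases.length := by rw [pvAliases_length]; omega
    have hgmem : pvAliases[pvRk g] = pvNorm g := List.getElem_idxOf hlen
    have hcontra := hpre (pvRk g) hlt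
    rw [List.any_eq_false] at hcontra
    have hgf := hcontra g hg
    rw [hgmem] at hgf
    simp at hgf
  have h1 : pvM fs 6 ≤ i := hrkf ▸ pvM_le_of_mem 6 hf
  have h2 : i ≤ pvM fs 6 := pvM_ge 6 hge (by omega)
  omega

-- when no alias is matched, every rank is 6
theorem pvM_of_no_win (fs : List String) (h : pvWin fs = none) : pvM fs 6 = 6 := by
  have hall := List.find?_eq_none.mp h
  have hge : ∀ f ∈ fs, 6 ≤ pvRk f := by
    intro f hf
    have hnot : pvNorm f ∉ pvAliases := by
      intro hmem
      have h2 := hall (pvNorm f) hmem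
      exact h2 (List.any_eq_true.mpr ⟨f, hf, beq_iff_eq.mpr rfl⟩)
    have hidx : pvAliases.idxOf (pvNorm f) = pvAliases.length := List.idxOf_eq_length hnot
    unfold pvRk
    rw [hidx, pvAliases_length]
  have h1 := pvM_le fs 6
  have h2 := pvM_ge 6 hge (le_refl 6)
  omega

-- rank-i predicate coincides with matching the i-th alias
theorem pv_pred_eq (i : Nat) (hi : i < 6) :
    (fun f => pvRk f == i) = (fun f => pvNorm f == pvAliases[i]) := by
  funext f
  by_cases h : pvNorm f = pvAliases[i]
  · have h1 : pvRk f = i := by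
      unfold pvRk
      rw [h]
      exact pvAliases_nodup.idxOf_getElem ..
    rw [beq_iff_eq.mpr h, beq_iff_eq.mpr h1]
  · have h1 : pvRk f ≠ i := by
      intro hrk
      apply h
      have hlen : pvRk f < pvAliases.length := by rw [pvAliases_length]; omega
      have hg : pvAliases[pvAliases.idxOf (pvNorm f)] = pvNorm f := List.getElem_idxOf hlen
      unfold pvRk at hrk
      simp only [hrk] at hg
      exact hg.symm
    rw [beq_eq_false_iff_ne.mpr h1, beq_eq_false_iff_ne.mpr h]

-- ===== VERDICT (by name: the statement is the Claim_ definition above) =====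
theorem find_domain_column_py_spec : Claim_equal_find_domain_column_py := by
  intro fs _ hpre
  unfold Spec_find_domain_column_py
  rw [pvA_char, pvB_char]
  cases hwin : pvWin fs with
  | none => rw [pvM_of_no_win fs hwin]; simp
  | some a =>
    obtain ⟨i, hi, hia, hM⟩ := pvM_of_win fs a hwin
    rw [hM, if_pos hi, pv_pred_eq i hi, hia]
    unfold Pre_find_domain_column_py at hpre
    rw [hwin] at hpre
    simp only [beq_iff_eq] at hpre
    rw [← List.head?_reverse, ← List.filter_reverse] at hpre
    rw [(List.head?_filter ..), (List.head?_filter ..)] at hpre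
    exact hpre.symm
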